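-- pv_equiv track=rewrite | github.com/dklarin/rezervacije-flask | posalji_podatak copy.py | spajanje_noci_dinamicki
-- ===== SOURCE A (Python) =====
-- def spajanje_noci_dinamicki(liste):
--
--     broj_listi = len(liste)
--     rezultat = []
--
--     for elementi in zip(*liste):
--         # Provjera za spoj dviju lista
--         if broj_listi == 2:
--             elem1, elem2 = elementi
--             if elem1 == '' and elem2 != '':
--                 rezultat.append(elem2)
--             else:
--                 rezultat.append(elem1)
--         # Provjera za spoj tri liste
--         elif broj_listi == 3:
--             elem1, elem2, elem3 = elementi
--             if elem1 == '' and elem2 != '':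
--                 rezultat.append(elem2)
--             elif elem1 == '' and elem3 != '':
--                 rezultat.append(elem3)
--             else:
--                 rezultat.append(elem1)
--         # Provjera za spajanje četiri liste
--         elif broj_listi == 4:
--             elem1, elem2, elem3, elem4 = elementi
--             if elem1 == '' and elem2 != '':
--                 rezultat.append(elem2)
--             elif elem1 == '' and elem3 != '':
--                 rezultat.append(elem3)
--             elif elem1 == '' and elem4 != '':
--                 rezultat.append(elem4)
--             else:
--                 rezultat.append(elem1)
--         # Provjera za spajanje pet lista
--         elif broj_listi == 5:
--             elem1, elem2, elem3, elem4, elem5 = elementi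
--             if elem1 == '' and elem2 != '':
--                 rezultat.append(elem2)
--             elif elem1 == '' and elem3 != '':
--                 rezultat.append(elem3)
--             elif elem1 == '' and elem4 != '':
--                 rezultat.append(elem4)
--             elif elem1 == '' and elem5 != '':
--                 rezultat.append(elem5)
--             else:
--                 rezultat.append(elem1)
--
--     return rezultat
-- ===== SOURCE B (Python) =====
-- def spajanje_noci_dinamicki(liste):
--     if len(liste) not in (2, 3, 4, 5):
--         return []
--     n = min(len(l) for l in liste)
--     rezultat = liste[0][:n]
--     for red in liste[1:]:
--         rezultat = [r if r != '' else red[i] for i, r in enumerate(rezultat)]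
--     return rezultat
-- ===== Notes on version B (the rewrite author's own statement) =====
-- stated objective: alternative
-- what changed: Instead of A's per-column pass with an unrolled branch chain over zip(*liste), B folds row-by-row: it starts from the first list truncated to the shortest length and successively overwrites still-empty positions from each later list, never forming columns at all.
import Mathlib
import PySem

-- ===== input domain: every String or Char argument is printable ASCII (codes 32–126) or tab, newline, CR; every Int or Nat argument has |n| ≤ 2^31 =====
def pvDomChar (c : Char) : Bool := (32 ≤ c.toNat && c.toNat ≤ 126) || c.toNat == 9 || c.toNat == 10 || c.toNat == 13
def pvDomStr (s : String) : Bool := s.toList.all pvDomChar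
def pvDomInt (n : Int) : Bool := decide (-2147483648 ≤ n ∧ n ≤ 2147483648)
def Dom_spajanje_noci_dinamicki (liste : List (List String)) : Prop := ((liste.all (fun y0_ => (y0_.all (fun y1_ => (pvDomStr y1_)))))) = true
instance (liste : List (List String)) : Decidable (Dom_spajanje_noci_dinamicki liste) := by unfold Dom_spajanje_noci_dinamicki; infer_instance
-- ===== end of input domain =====

-- B replaces A's column-wise zip with an unrolled per-count branch chain by a row-by-row staged
-- overwrite fold (objective: alternative decomposition); same cost, same return values.


-- ===== PORT A =====
-- zip(*liste): list of columns, truncated to the shortest list; zip() with no args is empty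
def pyZipStar (liste : List (List String)) : List (List String) :=
  match liste with
  | [] => []
  | _ => (List.range (((liste.map List.length).min?).getD 0)).map
      (fun i => liste.map (fun l => l.getD i ""))

-- A's per-position unrolled branch dispatch on the number of lists (returns the appended items)
def pvChooseA (n : Nat) (c : List String) : List String :=
  if n = 2 then
    match c with
    | [e1, e2] => [if e1 = "" ∧ e2 ≠ "" then e2 else e1]
    | _ => []
  else if n = 3 then
    match c with
    | [e1, e2, e3] =>
        [if e1 = "" ∧ e2 ≠ "" then e2 else if e1 = "" ∧ e3 ≠ "" then e3 else e1]
    | _ => []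
  else if n = 4 then
    match c with
    | [e1, e2, e3, e4] =>
        [if e1 = "" ∧ e2 ≠ "" then e2 else if e1 = "" ∧ e3 ≠ "" then e3
         else if e1 = "" ∧ e4 ≠ "" then e4 else e1]
    | _ => []
  else if n = 5 then
    match c with
    | [e1, e2, e3, e4, e5] =>
        [if e1 = "" ∧ e2 ≠ "" then e2 else if e1 = "" ∧ e3 ≠ "" then e3
         else if e1 = "" ∧ e4 ≠ "" then e4 else if e1 = "" ∧ e5 ≠ "" then e5 else e1]
    | _ => []
  else []

def spajanje_noci_dinamicki (liste : List (List String)) : List String :=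
  (pyZipStar liste).foldl (fun rezultat elementi => rezultat ++ pvChooseA liste.length elementi) []

-- ===== PORT B =====
-- one staged pass: keep rezultat[i] if non-empty, else fill it from the current row
-- (red[i] is ported as getD: inside the guard i < n ≤ red.length, so it is exact)
def pvMergeRow (rezultat red : List String) : List String :=
  rezultat.zipIdx.map (fun p => if p.1 ≠ "" then p.1 else red.getD p.2 "")

def spajanje_noci_dinamicki_alt (liste : List (List String)) : List String :=
  if liste.length = 2 ∨ liste.length = 3 ∨ liste.length = 4 ∨ liste.length = 5 then
    (liste.drop 1).foldl pvMergeRow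
      ((liste.headD []).take (((liste.map List.length).min?).getD 0))
  else []

-- ===== PRECONDITION & SPEC =====
def Spec_spajanje_noci_dinamicki (liste : List (List String)) (out : List String) : Prop := out = spajanje_noci_dinamicki_alt liste
instance (liste : List (List String)) (out : List String) : Decidable (Spec_spajanje_noci_dinamicki liste out) := by unfold Spec_spajanje_noci_dinamicki; infer_instance

-- ===== CLAIM (what is proved, stated in full; the proofs are below) =====
def Claim_equal_spajanje_noci_dinamicki : Prop := ∀ (liste : List (List String)), Dom_spajanje_noci_dinamicki liste → Spec_spajanje_noci_dinamicki liste (spajanje_noci_dinamicki liste)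

-- ===== LEMMAS AND PROOFS =====

-- the per-column value both sides compute: first element if non-empty, else first non-empty of the rest
def pvFirst (c : List String) : String :=
  match c with
  | [] => ""
  | prvi :: rest => if prvi ≠ "" then prvi else ((rest.find? (fun e => e ≠ "")).getD prvi)

theorem pvFirst_cons (p : String) (rest : List String) :
    pvFirst (p :: rest) = if p ≠ "" then p else ((rest.find? (fun e => e ≠ "")).getD "") := by
  by_cases h : p = "" <;> simp [pvFirst, h]

theorem pvChooseA_eq (n : Nat) (hn : n = 2 ∨ n = 3 ∨ n = 4 ∨ n = 5)
    (c : List String) (hc : c.length = n) : pvChooseA n c = [pvFirst c] := by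
  rcases hn with h | h | h | h <;> subst h <;>
    (match c, hc with
     | [e1, e2], _ => by_cases h1 : e1 = "" <;> by_cases h2 : e2 = "" <;>
        simp_all [pvChooseA, pvFirst, List.find?]
     | [e1, e2, e3], _ => by_cases h1 : e1 = "" <;> by_cases h2 : e2 = "" <;>
        by_cases h3 : e3 = "" <;> simp_all [pvChooseA, pvFirst, List.find?]
     | [e1, e2, e3, e4], _ => by_cases h1 : e1 = "" <;> by_cases h2 : e2 = "" <;>
        by_cases h3 : e3 = "" <;> by_cases h4 : e4 = "" <;>
        simp_all [pvChooseA, pvFirst, List.find?]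
     | [e1, e2, e3, e4, e5], _ => by_cases h1 : e1 = "" <;> by_cases h2 : e2 = "" <;>
        by_cases h3 : e3 = "" <;> by_cases h4 : e4 = "" <;> by_cases h5 : e5 = "" <;>
        simp_all [pvChooseA, pvFirst, List.find?])

theorem pvChooseA_nil (n : Nat) (hn : ¬ (n = 2 ∨ n = 3 ∨ n = 4 ∨ n = 5))
    (c : List String) : pvChooseA n c = [] := by
  push Not at hn
  obtain ⟨h2, h3, h4, h5⟩ := hn
  simp [pvChooseA, h2, h3, h4, h5]

theorem pvZipStar_col_len (liste : List (List String)) (c : List String)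
    (hc : c ∈ pyZipStar liste) : c.length = liste.length := by
  unfold pyZipStar at hc
  match liste, hc with
  | l :: ls, hc =>
    simp only [List.mem_map] at hc
    obtain ⟨i, _, rfl⟩ := hc
    simp

theorem foldl_append_singleton (f : List String → List String) (g : List String → String)
    (xs : List (List String)) (init : List String)
    (hf : ∀ c ∈ xs, f c = [g c]) :
    xs.foldl (fun acc c => acc ++ f c) init = init ++ xs.map g := by
  induction xs generalizing init with
  | nil => simp
  | cons x xs ih =>
    simp only [List.foldl_cons, List.map_cons, hf x (by simp),
      ih (init ++ [g x]) (fun c hc => hf c (by simp [hc]))]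
    simp

theorem foldl_append_nil (f : List String → List String)
    (xs : List (List String)) (init : List String)
    (hf : ∀ c ∈ xs, f c = []) :
    xs.foldl (fun acc c => acc ++ f c) init = init := by
  induction xs generalizing init with
  | nil => rfl
  | cons x xs ih =>
    rw [List.foldl_cons, hf x (by simp), List.append_nil]
    exact ih init (fun c hc => hf c (by simp [hc]))

theorem pvMergeRow_length (rez red : List String) :
    (pvMergeRow rez red).length = rez.length := by
  simp [pvMergeRow]

theorem pvMergeRow_getD (rez red : List String) (i : Nat) (hi : i < rez.length) :
    (pvMergeRow rez red)[i]?.getD "" =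
      if rez[i]?.getD "" ≠ "" then rez[i]?.getD "" else red[i]?.getD "" := by
  simp [pvMergeRow, hi, List.getElem_map, List.getElem_zipIdx]

theorem foldl_merge_length (rs : List (List String)) (rez : List String) :
    (rs.foldl pvMergeRow rez).length = rez.length := by
  induction rs generalizing rez with
  | nil => rfl
  | cons r rs ih => rw [List.foldl_cons, ih, pvMergeRow_length]

theorem foldl_merge_getD (rs : List (List String)) (rez : List String)
    (i : Nat) (hi : i < rez.length) :
    (rs.foldl pvMergeRow rez)[i]?.getD "" =
      if rez[i]?.getD "" ≠ "" then rez[i]?.getD ""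
      else ((rs.map (fun l => l[i]?.getD "")).find? (fun e => e ≠ "")).getD "" := by
  induction rs generalizing rez with
  | nil => by_cases h : rez[i]?.getD "" = "" <;> simp [h]
  | cons r rs ih =>
    rw [List.foldl_cons, ih (pvMergeRow rez r) (by rw [pvMergeRow_length]; exact hi),
        pvMergeRow_getD rez r i hi, List.map_cons]
    by_cases h1 : rez[i]?.getD "" = ""
    · by_cases h2 : r[i]?.getD "" = ""
      · rw [List.find?_cons_of_neg (by simp [h2])]; simp [h1, h2]
      · rw [List.find?_cons_of_pos (by simp [h2])]; simp [h1, h2]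
    · simp [h1]

-- ===== VERDICT (by name: the statement is the Claim_ definition above) =====
theorem spajanje_noci_dinamicki_spec : Claim_equal_spajanje_noci_dinamicki := by
  intro liste _
  unfold Spec_spajanje_noci_dinamicki spajanje_noci_dinamicki spajanje_noci_dinamicki_alt
  by_cases hn : liste.length = 2 ∨ liste.length = 3 ∨ liste.length = 4 ∨ liste.length = 5
  · simp only [hn, if_true]
    rw [foldl_append_singleton _ pvFirst _ _
      (fun c hc => pvChooseA_eq liste.length hn c (pvZipStar_col_len liste c hc)),
      List.nil_append]
    -- both sides elementwise
    match liste, hn with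
    | l :: ls, hn =>
      obtain ⟨n, hn0⟩ : ∃ n, (((l :: ls).map List.length).min?).getD 0 = n := ⟨_, rfl⟩
      have hnl : n ≤ l.length := hn0 ▸ List.min?_getD_le_of_mem (by simp)
      have hzip : pyZipStar (l :: ls) = (List.range n).map
          (fun i => (l :: ls).map (fun l' => l'.getD i "")) := by
        simp only [pyZipStar, hn0]
      rw [hzip, show ((l :: ls).drop 1) = ls from rfl,
          show ((l :: ls).headD []) = l from rfl, hn0]
      apply List.ext_getElem
      · simp only [List.length_map, List.length_range, foldl_merge_length, List.length_take]
        omega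
      · intro i h1 h2
        have hi : i < n := by simpa using h1
        have hlen : i < (l.take n).length := by simp [List.length_take]; omega
        have h2' : i < (ls.foldl pvMergeRow (l.take n)).length := by
          rw [foldl_merge_length]; exact hlen
        have hR := foldl_merge_getD ls (l.take n) i hlen
        rw [List.getElem?_eq_getElem h2', Option.getD_some] at hR
        rw [List.getElem_map, List.getElem_map, List.getElem_range, List.map_cons,
            pvFirst_cons, hR]
        simp only [List.getD_eq_getElem?_getD, List.getElem?_take, hi, if_pos]
  · simp only [hn, if_false]
    exact foldl_append_nil _ _ _ (fun c _ => pvChooseA_nil liste.length hn c)
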